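-- pv_equiv track=rewrite | github.com/sestys/alg_puzzles | dragontree/main.py | kadaneTop
-- ===== SOURCE A (Python) =====
-- def getBranchesTop(matrix, c, r):
--     branches=[[0]*c for i in range(r)]
--     for j in range(c):
--         for i in range(r-1):
--             if i == 0:
--                 branches[i][j] = matrix[i][j]
--             elif matrix[i][j]+branches[i-1][j] > matrix[i][j]:
--                 branches[i][j] = matrix[i][j] + branches[i-1][j]
--             else:
--                 branches[i][j]= matrix[i][j]
--     return branches
--
-- def kadaneTop(matrix, c, r, maxSum):
--     branches = getBranchesTop(matrix, c, r)
--     for j in range(1,r): #dont do the top row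
--         for offset in range(c-2): #offset on the begining from left
--             b=[branches[j-1][offset], branches[j-1][offset+1], branches[j-1][offset+2]]
--             msum = matrix[j][offset] + matrix[j][offset+1] + matrix[j][offset+2] + branches[j-1][offset]+branches[j-1][offset+1] + branches[j-1][offset+2]
--             minBranche = min(b)
--             if msum > maxSum:
--                 maxSum = msum
--             for i in range(offset + 3, c): #adding to the right
--                 msum = msum + matrix[j][i]
--                 if minBranche < branches[j-1][i]:
--                     b.remove(minBranche)
--                     msum = msum - minBranche + branches[j-1][i]
--                     b.append(branches[j-1][i])
--                     minBranche = min(b)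
--                 if msum > maxSum:
--                     maxSum = msum
--     return maxSum
-- ===== SOURCE B (Python) =====
-- def kadaneTop(matrix, c, r, maxSum):
--     # Re-implementation: stream the branch table row by row (no full r x c table),
--     # use per-row prefix sums, and recompute each window's branch contribution as
--     # the sum of the three largest values of the branch slice via sorted(...)[-3:].
--     best = maxSum
--     if c < 3 or r < 2:
--         return best
--     prev = [matrix[0][jj] for jj in range(c)]  # branch row 0
--     for j in range(1, r):
--         P = [0]
--         for jj in range(c):
--             P.append(P[-1] + matrix[j][jj])
--         for lo in range(c - 2):
--             for hi in range(lo + 2, c):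
--                 cand = P[hi + 1] - P[lo] + sum(sorted(prev[lo:hi + 1])[-3:])
--                 if cand > best:
--                     best = cand
--         prev = [matrix[j][jj] + (prev[jj] if prev[jj] > 0 else 0) for jj in range(c)]
--     return best
-- ===== Notes on version B (the rewrite author's own statement) =====
-- stated objective: alternative
-- what changed: B streams the branch table row by row instead of building A's full r x c column-major table, replaces A's running interval sum and incrementally maintained 3-element top-branch list (remove/append/min bookkeeping) with per-row prefix sums and a per-window recomputation of the sum of the three largest branch values via sorted(...)[-3:].
import Mathlib
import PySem

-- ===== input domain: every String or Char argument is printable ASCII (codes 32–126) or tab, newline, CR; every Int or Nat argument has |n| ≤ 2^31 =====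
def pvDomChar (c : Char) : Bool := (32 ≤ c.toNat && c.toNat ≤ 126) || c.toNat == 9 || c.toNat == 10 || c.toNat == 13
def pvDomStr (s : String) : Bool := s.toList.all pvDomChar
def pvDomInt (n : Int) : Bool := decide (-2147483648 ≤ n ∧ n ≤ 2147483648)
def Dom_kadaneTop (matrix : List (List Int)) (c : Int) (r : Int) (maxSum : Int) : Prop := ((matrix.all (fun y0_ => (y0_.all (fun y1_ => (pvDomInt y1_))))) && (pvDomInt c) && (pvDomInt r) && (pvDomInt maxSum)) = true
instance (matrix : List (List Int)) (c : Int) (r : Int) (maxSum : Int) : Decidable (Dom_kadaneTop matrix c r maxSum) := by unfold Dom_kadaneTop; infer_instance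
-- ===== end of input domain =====

-- B re-implements A with a streamed branch row (no r×c table), per-row prefix sums and a
-- recomputed sum of the three largest branch values per window (sorted slice), instead of
-- A's column-built table and incrementally maintained 3-element list; objective: alternative.

-- ===== PORT A =====
-- shared 2-D indexed read matrix[i][j] (total: Pre_ keeps every executed read in range)
def pvMGet (m : List (List Int)) (i j : Int) : Int :=
  (PySem.List.pyGet? ((PySem.List.pyGet? m i).getD []) j).getD 0

-- branches[i][j] = v  (indices nonnegative and in range along every executed path)
def pvSet2 (br : List (List Int)) (i j : Nat) (v : Int) : List (List Int) :=
  br.set i (((br[i]?).getD []).set j v)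

def pvGetBranchesTop (matrix : List (List Int)) (c r : Int) : List (List Int) :=
  (PySem.List.pyRange 0 c).foldl (fun br j =>
    (PySem.List.pyRange 0 (r - 1)).foldl (fun br i =>
      let v : Int :=
        if i = 0 then pvMGet matrix i j
        else if pvMGet matrix i j + pvMGet br (i - 1) j > pvMGet matrix i j then
          pvMGet matrix i j + pvMGet br (i - 1) j
        else pvMGet matrix i j
      pvSet2 br i.toNat j.toNat v) br)
    ((PySem.List.pyRange 0 r).map (fun _ => List.replicate c.toNat 0))

def kadaneTop (matrix : List (List Int)) (c : Int) (r : Int) (maxSum : Int) : Int :=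
  let branches := pvGetBranchesTop matrix c r
  (PySem.List.pyRange 1 r).foldl (fun maxSum j =>
    (PySem.List.pyRange 0 (c - 2)).foldl (fun maxSum offset =>
      let b : List Int := [pvMGet branches (j - 1) offset, pvMGet branches (j - 1) (offset + 1),
                           pvMGet branches (j - 1) (offset + 2)]
      let msum := pvMGet matrix j offset + pvMGet matrix j (offset + 1) + pvMGet matrix j (offset + 2)
                  + pvMGet branches (j - 1) offset + pvMGet branches (j - 1) (offset + 1)
                  + pvMGet branches (j - 1) (offset + 2)
      let minB := (PySem.List.min? b (fun x => x)).getD 0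
      let maxSum1 := if msum > maxSum then msum else maxSum
      let st := (PySem.List.pyRange (offset + 3) c).foldl
        (fun (st : List Int × Int × Int × Int) i =>
          let msum := st.2.1 + pvMGet matrix j i
          if st.2.2.1 < pvMGet branches (j - 1) i then
            let b := (PySem.List.remove? st.1 st.2.2.1).getD st.1 ++ [pvMGet branches (j - 1) i]
            let msum := msum - st.2.2.1 + pvMGet branches (j - 1) i
            let minB := (PySem.List.min? b (fun x => x)).getD 0
            (b, msum, minB, if msum > st.2.2.2 then msum else st.2.2.2)
          else
            (st.1, msum, st.2.2.1, if msum > st.2.2.2 then msum else st.2.2.2))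
        (b, msum, minB, maxSum1)
      st.2.2.2) maxSum) maxSum

-- ===== PORT B =====
def kadaneTop_alt (matrix : List (List Int)) (c : Int) (r : Int) (maxSum : Int) : Int :=
  if c < 3 ∨ r < 2 then maxSum
  else
    let prev0 := (PySem.List.pyRange 0 c).map (fun jj => pvMGet matrix 0 jj)
    let st := (PySem.List.pyRange 1 r).foldl (fun (st : List Int × Int) j =>
      let prev := st.1
      let P := (PySem.List.pyRange 0 c).foldl
        (fun P jj => P ++ [(PySem.List.pyGet? P (-1)).getD 0 + pvMGet matrix j jj]) [(0 : Int)]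
      let best := (PySem.List.pyRange 0 (c - 2)).foldl (fun best lo =>
        (PySem.List.pyRange (lo + 2) c).foldl (fun best hi =>
          let cand := (PySem.List.pyGet? P (hi + 1)).getD 0 - (PySem.List.pyGet? P lo).getD 0
            + (PySem.List.slice
                 (PySem.List.sorted (PySem.List.slice prev (some lo) (some (hi + 1))) (fun x => x))
                 (some (-3)) none).sum
          if cand > best then cand else best) best) st.2
      let prev := (PySem.List.pyRange 0 c).map (fun jj =>
        pvMGet matrix j jj
          + (if (PySem.List.pyGet? prev jj).getD 0 > 0 then (PySem.List.pyGet? prev jj).getD 0 else 0))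
      (prev, best)) (prev0, maxSum)
    st.2

-- ===== PRECONDITION & SPEC =====
-- Pre_ excludes exactly the inputs where Python A raises IndexError: whenever r ≥ 2 and
-- c ≥ 1 the first r rows (first r-1 rows when c < 3: the last row is then never read)
-- must exist and have at least c entries.
def Pre_kadaneTop (matrix : List (List Int)) (c : Int) (r : Int) (maxSum : Int) : Prop :=
  2 ≤ r → 1 ≤ c →
    ((if 3 ≤ c then r else r - 1).toNat ≤ matrix.length ∧
     ∀ row ∈ matrix.take (if 3 ≤ c then r else r - 1).toNat, c ≤ row.length)
instance (matrix : List (List Int)) (c : Int) (r : Int) (maxSum : Int) : Decidable (Pre_kadaneTop matrix c r maxSum) := by unfold Pre_kadaneTop; infer_instance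

def pvWitness_kadaneTop : List (List Int) × Int × Int × Int := ([[1, 2, 3], [4, -5, 6]], 3, 2, 0)

def Spec_kadaneTop (matrix : List (List Int)) (c : Int) (r : Int) (maxSum : Int) (out : Int) : Prop := out = kadaneTop_alt matrix c r maxSum
instance (matrix : List (List Int)) (c : Int) (r : Int) (maxSum : Int) (out : Int) : Decidable (Spec_kadaneTop matrix c r maxSum out) := by unfold Spec_kadaneTop; infer_instance

-- ===== CLAIM (what is proved, stated in full; the proofs are below) =====
def Claim_equal_kadaneTop : Prop := ∀ (matrix : List (List Int)) (c : Int) (r : Int) (maxSum : Int), Dom_kadaneTop matrix c r maxSum → Pre_kadaneTop matrix c r maxSum → Spec_kadaneTop matrix c r maxSum (kadaneTop matrix c r maxSum)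

-- ===== LEMMAS AND PROOFS =====

-- matrix[i][j] with Nat indices
def pvEnt (m : List (List Int)) (i j : Nat) : Int := ((m[i]?.getD [])[j]?).getD 0

-- the branch value both programs compute for row i, column jj
def pvBr (m : List (List Int)) : Nat → Nat → Int
  | 0, jj => pvEnt m 0 jj
  | (i + 1), jj => pvEnt m (i + 1) jj + (if 0 < pvBr m i jj then pvBr m i jj else 0)

-- window of branch values [lo, k), its interval row sum, and the top-3 of a window
def pvW (β : Nat → Int) (lo k : Nat) : List Int := (List.range' lo (k - lo)).map β
def pvRS (γ : Nat → Int) (lo k : Nat) : Int := ((List.range' lo (k - lo)).map γ).sum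
def pvTop3 (w : List Int) : List Int :=
  (PySem.List.sorted w (fun x => x)).drop (w.length - 3)
def pvF (β γ : Nat → Int) (lo e : Nat) : Int := pvRS γ lo e + (pvTop3 (pvW β lo e)).sum

-- the common value of one outer-row iteration of either program
def pvStep (β γ : Nat → Int) (cN : Nat) (M : Int) : Int :=
  (List.range (cN - 2)).foldl (fun M lo =>
    (List.range' (lo + 2) (cN - (lo + 2))).foldl
      (fun M hi => if pvF β γ lo (hi + 1) > M then pvF β γ lo (hi + 1) else M) M) M

-- A's inner-loop state transformer, with the branch/matrix reads abstracted to β/γ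
def pvBodyA (β γ : Nat → Int) (st : List Int × Int × Int × Int) (e : Nat) :
    List Int × Int × Int × Int :=
  let msum := st.2.1 + γ e
  if st.2.2.1 < β e then
    let b := (PySem.List.remove? st.1 st.2.2.1).getD st.1 ++ [β e]
    let msum := msum - st.2.2.1 + β e
    let minB := (PySem.List.min? b (fun x => x)).getD 0
    (b, msum, minB, if msum > st.2.2.2 then msum else st.2.2.2)
  else
    (st.1, msum, st.2.2.1, if msum > st.2.2.2 then msum else st.2.2.2)

-- A's per-row body (definitionally the j-iteration of kadaneTop with branches := T)
def pvRowBodyA (matrix T : List (List Int)) (c : Int) (j maxSum : Int) : Int :=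
  (PySem.List.pyRange 0 (c - 2)).foldl (fun maxSum offset =>
    let b : List Int := [pvMGet T (j - 1) offset, pvMGet T (j - 1) (offset + 1),
                         pvMGet T (j - 1) (offset + 2)]
    let msum := pvMGet matrix j offset + pvMGet matrix j (offset + 1) + pvMGet matrix j (offset + 2)
                + pvMGet T (j - 1) offset + pvMGet T (j - 1) (offset + 1)
                + pvMGet T (j - 1) (offset + 2)
    let minB := (PySem.List.min? b (fun x => x)).getD 0
    let maxSum1 := if msum > maxSum then msum else maxSum
    let st := (PySem.List.pyRange (offset + 3) c).foldl
      (fun (st : List Int × Int × Int × Int) i =>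
        let msum := st.2.1 + pvMGet matrix j i
        if st.2.2.1 < pvMGet T (j - 1) i then
          let b := (PySem.List.remove? st.1 st.2.2.1).getD st.1 ++ [pvMGet T (j - 1) i]
          let msum := msum - st.2.2.1 + pvMGet T (j - 1) i
          let minB := (PySem.List.min? b (fun x => x)).getD 0
          (b, msum, minB, if msum > st.2.2.2 then msum else st.2.2.2)
        else
          (st.1, msum, st.2.2.1, if msum > st.2.2.2 then msum else st.2.2.2))
      (b, msum, minB, maxSum1)
    st.2.2.2) maxSum

-- B's per-row body (definitionally the j-iteration of kadaneTop_alt)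
def pvRowBodyB (matrix : List (List Int)) (c : Int) (j : Int) (st : List Int × Int) :
    List Int × Int :=
  let prev := st.1
  let P := (PySem.List.pyRange 0 c).foldl
    (fun P jj => P ++ [(PySem.List.pyGet? P (-1)).getD 0 + pvMGet matrix j jj]) [(0 : Int)]
  let best := (PySem.List.pyRange 0 (c - 2)).foldl (fun best lo =>
    (PySem.List.pyRange (lo + 2) c).foldl (fun best hi =>
      let cand := (PySem.List.pyGet? P (hi + 1)).getD 0 - (PySem.List.pyGet? P lo).getD 0
        + (PySem.List.slice
             (PySem.List.sorted (PySem.List.slice prev (some lo) (some (hi + 1))) (fun x => x))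
             (some (-3)) none).sum
      if cand > best then cand else best) best) st.2
  let prev := (PySem.List.pyRange 0 c).map (fun jj =>
    pvMGet matrix j jj
      + (if (PySem.List.pyGet? prev jj).getD 0 > 0 then (PySem.List.pyGet? prev jj).getD 0 else 0))
  (prev, best)

-- the final branch table as a function table
def pvTab (rN cN : Nat) (f : Nat → Nat → Int) : List (List Int) :=
  (List.range rN).map (fun i => (List.range cN).map (f i))
def pvEin (m : List (List Int)) (rN n k : Nat) : Nat → Nat → Int :=
  fun i jj => if i < rN - 1 ∧ (jj < n ∨ (jj = n ∧ i < k)) then pvBr m i jj else 0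
def pvEfin (m : List (List Int)) (rN : Nat) : Nat → Nat → Int :=
  fun i jj => if i < rN - 1 then pvBr m i jj else 0


lemma pvPyRange_aux (n : Nat) : ∀ (a b : Int), 0 ≤ a → (b - a).toNat = n →
    PySem.List.pyRange a b = (List.range' a.toNat n).map (fun (k : Nat) => (k : Int)) := by
  induction n with
  | zero => intro a b ha hn; rw [PySem.List.pyRange_one_eq_nil (by omega)]; simp
  | succ n ih =>
    intro a b ha hn
    have h : a < b := by omega
    have h1 : (a + 1).toNat = a.toNat + 1 := by omega
    have h2 : ((a.toNat : Int)) = a := by omega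
    rw [PySem.List.pyRange_one_cons h, List.range'_succ, List.map_cons,
        ih (a + 1) b (by omega) (by omega), h1, h2]

lemma pvPyRange_eq (a b : Int) (ha : 0 ≤ a) :
    PySem.List.pyRange a b = (List.range' a.toNat (b - a).toNat).map (fun (k : Nat) => (k : Int)) :=
  pvPyRange_aux (b - a).toNat a b ha rfl

lemma pvMin_head (b : List Int) (v0 : Int) (vs : List Int)
    (h : PySem.List.sorted b (fun x => x) = v0 :: vs) :
    (PySem.List.min? b (fun x => x)).getD 0 = v0 := by
  have hb : b ≠ [] := by
    intro he
    rw [(PySem.List.sorted_eq_nil_iff b (fun x => x) false).mpr he] at h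
    simp at h
  obtain ⟨m, hm⟩ : ∃ m, PySem.List.min? b (fun x => x) = some m := by
    cases hmin : PySem.List.min? b (fun x => x) with
    | none => exact absurd ((PySem.List.min?_eq_none_iff b (fun x => x)).mp hmin) hb
    | some m => exact ⟨m, rfl⟩
  have hmem : m ∈ b := PySem.List.min?_mem hm
  have hv0b : v0 ∈ b := by
    have := (PySem.List.sorted_perm b (fun x => x) false).mem_iff (a := v0)
    rw [h] at this; exact this.mp List.mem_cons_self
  have h1 : m ≤ v0 := PySem.List.min?_isMin hm v0 hv0b
  have h2 : v0 ≤ m := PySem.List.key_head_sorted_le b (fun x => x) h m hmem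
  rw [hm]; simpa using le_antisymm h1 h2

lemma pvMem_oi2 (y x v1 v2 : Int) (hy : y ∈ List.orderedInsert (· ≤ ·) x [v1, v2]) :
    y = x ∨ y = v1 ∨ y = v2 := by
  rcases (List.mem_orderedInsert _).mp hy with h | h
  · exact Or.inl h
  · simp at h; tauto

lemma pvSorted_snoc (w : List Int) (x v0 v1 v2 : Int) (u : List Int)
    (h : PySem.List.sorted w (fun y => y) = u ++ [v0, v1, v2]) :
    PySem.List.sorted (w ++ [x]) (fun y => y) =
      if v0 < x then u ++ v0 :: List.orderedInsert (· ≤ ·) x [v1, v2]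
      else List.orderedInsert (· ≤ ·) x u ++ [v0, v1, v2] := by
  have hperm : (u ++ [v0, v1, v2]).Perm w := h ▸ PySem.List.sorted_perm w (fun y => y) false
  have hpw : List.Pairwise (fun a b : Int => a ≤ b) (u ++ [v0, v1, v2]) := by
    have := PySem.List.sorted_pairwise w (fun y => y)
    rw [h] at this; exact this
  obtain ⟨hpu, hpv, hcross⟩ := List.pairwise_append.mp hpw
  have hv01 : v0 ≤ v1 := by simp at hpv; omega
  have hv02 : v0 ≤ v2 := by simp at hpv; omega
  have hv12 : v1 ≤ v2 := by simp at hpv; omega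
  apply PySem.List.sorted_id_eq_of_perm_of_pairwise
  · -- perm
    have base : (x :: (u ++ [v0, v1, v2])).Perm (w ++ [x]) :=
      ((List.Perm.cons x hperm).trans (List.perm_append_singleton x w).symm)
    split_ifs with hlt
    · have p1 : (u ++ v0 :: List.orderedInsert (· ≤ ·) x [v1, v2]).Perm
          (u ++ v0 :: x :: [v1, v2]) :=
        List.Perm.append_left u (List.Perm.cons v0 (List.perm_orderedInsert _ x [v1, v2]))
      have e1 : u ++ v0 :: x :: [v1, v2] = (u ++ [v0]) ++ x :: [v1, v2] := by simp
      have p2 : ((u ++ [v0]) ++ x :: [v1, v2]).Perm (x :: ((u ++ [v0]) ++ [v1, v2])) :=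
        List.perm_middle
      have e2 : (u ++ [v0]) ++ [v1, v2] = u ++ [v0, v1, v2] := by simp
      refine (p1.trans ?_).trans base
      rw [e1]; rw [e2] at p2; exact p2
    · have p1 : (List.orderedInsert (· ≤ ·) x u ++ [v0, v1, v2]).Perm
          ((x :: u) ++ [v0, v1, v2]) := (List.perm_orderedInsert _ x u).append_right _
      have e1 : (x :: u) ++ [v0, v1, v2] = x :: (u ++ [v0, v1, v2]) := by simp
      refine p1.trans ?_
      rw [e1]; exact base
  · -- pairwise
    split_ifs with hlt
    · rw [List.pairwise_append]
      refine ⟨hpu, ?_, ?_⟩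
      · rw [List.pairwise_cons]
        refine ⟨?_, List.Pairwise.orderedInsert x [v1, v2] (by simp [hv12])⟩
        intro a ha
        rcases pvMem_oi2 a x v1 v2 ha with rfl | rfl | rfl <;> omega
      · intro a ha b hb
        have h0 : a ≤ v0 := hcross a ha v0 (by simp)
        have h1 : a ≤ v1 := hcross a ha v1 (by simp)
        have h2 : a ≤ v2 := hcross a ha v2 (by simp)
        rcases List.mem_cons.mp hb with rfl | hb
        · exact h0
        rcases pvMem_oi2 b x v1 v2 (by simpa using hb) with rfl | rfl | rfl <;> omega
    · rw [List.pairwise_append]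
      refine ⟨List.Pairwise.orderedInsert x u hpu, hpv, ?_⟩
      intro a ha b hb
      have hb' : b = v0 ∨ b = v1 ∨ b = v2 := by simpa using hb
      rcases (List.mem_orderedInsert _).mp ha with rfl | ha
      · rcases hb' with rfl | rfl | rfl <;> omega
      · have h0 := hcross a ha v0 (by simp)
        have h1 := hcross a ha v1 (by simp)
        have h2 := hcross a ha v2 (by simp)
        rcases hb' with rfl | rfl | rfl <;> omega


-- w sorted decomposition helper
lemma pvSorted_decomp (w : List Int) (h3 : 3 ≤ w.length) :
    ∃ u v0 v1 v2, PySem.List.sorted w (fun y => y) = u ++ [v0, v1, v2] ∧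
      pvTop3 w = [v0, v1, v2] ∧ u.length = w.length - 3 := by
  set t := PySem.List.sorted w (fun y => y) with ht
  have hlen : t.length = w.length := PySem.List.length_sorted w _ false
  have hdl : (t.drop (w.length - 3)).length = 3 := by
    rw [List.length_drop, hlen]; omega
  obtain ⟨v0, v1, v2, hv⟩ := List.length_eq_three.mp hdl
  refine ⟨t.take (w.length - 3), v0, v1, v2, ?_, ?_, ?_⟩
  · rw [← hv, List.take_append_drop]
  · rw [pvTop3, ← ht, hv]
  · rw [List.length_take, hlen]; omega

lemma pvTop3_snoc (w : List Int) (x : Int) (h3 : 3 ≤ w.length) (v0 v1 v2 : Int) (u : List Int)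
    (h : PySem.List.sorted w (fun y => y) = u ++ [v0, v1, v2]) :
    pvTop3 (w ++ [x]) =
      if v0 < x then List.orderedInsert (· ≤ ·) x [v1, v2] else [v0, v1, v2] := by
  have hu : u.length = w.length - 3 := by
    have := congrArg List.length h
    rw [PySem.List.length_sorted] at this
    simp at this; omega
  have hlen : (w ++ [x]).length - 3 = u.length + 1 := by
    simp [List.length_append]; omega
  rw [pvTop3, pvSorted_snoc w x v0 v1 v2 u h, hlen]
  split_ifs with hlt
  · -- drop (u.length+1) (u ++ v0 :: oi) = oi
    rw [show u ++ v0 :: List.orderedInsert (· ≤ ·) x [v1, v2]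
        = (u ++ [v0]) ++ List.orderedInsert (· ≤ ·) x [v1, v2] by simp]
    exact List.drop_left' (by simp)
  · exact List.drop_left' (by simp [List.orderedInsert_length])

lemma pvW_length (β : Nat → Int) (lo k : Nat) : (pvW β lo k).length = k - lo := by
  simp [pvW]

lemma pvW_snoc (β : Nat → Int) (lo k : Nat) (h : lo ≤ k) :
    pvW β lo (k + 1) = pvW β lo k ++ [β k] := by
  have h1 : k + 1 - lo = (k - lo) + 1 := by omega
  rw [pvW, h1, List.range'_concat, List.map_append, ← pvW]
  have : lo + 1 * (k - lo) = k := by omega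
  rw [this]; rfl

lemma pvRS_snoc (γ : Nat → Int) (lo k : Nat) (h : lo ≤ k) :
    pvRS γ lo (k + 1) = pvRS γ lo k + γ k := by
  have h1 : k + 1 - lo = (k - lo) + 1 := by omega
  rw [pvRS, h1, List.range'_concat, List.map_append, List.sum_append, ← pvRS]
  have : lo + 1 * (k - lo) = k := by omega
  rw [this]; simp

lemma pvInnerA (β γ : Nat → Int) (lo : Nat) (n : Nat) :
    ∀ (k : Nat) (b : List Int) (ms M : Int),
    lo + 3 ≤ k →
    PySem.List.sorted b (fun x => x) = pvTop3 (pvW β lo k) →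
    ms = pvRS γ lo k + b.sum →
    ((List.range' k n).foldl (pvBodyA β γ)
        (b, ms, (PySem.List.min? b (fun x => x)).getD 0, M)).2.2.2
      = (List.range' k n).foldl
          (fun M e => if pvF β γ lo (e + 1) > M then pvF β γ lo (e + 1) else M) M := by
  induction n with
  | zero => intro k b ms M _ _ _; simp
  | succ n ih =>
    intro k b ms M hk hsort hms
    rw [List.range'_succ, List.foldl_cons, List.foldl_cons]
    have h3 : 3 ≤ (pvW β lo k).length := by rw [pvW_length]; omega
    obtain ⟨u, v0, v1, v2, hdec, htop, hulen⟩ := pvSorted_decomp (pvW β lo k) h3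
    have hb3 : PySem.List.sorted b (fun x => x) = [v0, v1, v2] := by rw [hsort, htop]
    have hmin : (PySem.List.min? b (fun x => x)).getD 0 = v0 := pvMin_head b v0 [v1, v2] hb3
    have hbperm : b.Perm [v0, v1, v2] := by
      have := (PySem.List.sorted_perm b (fun x => x) false).symm
      rw [hb3] at this; exact this
    have hbsum : b.sum = v0 + v1 + v2 := by
      have := hbperm.sum_eq; simp at this; omega
    have hpw3 : List.Pairwise (fun a b : Int => a ≤ b) [v0, v1, v2] := by
      have := PySem.List.sorted_pairwise b (fun x => x); rw [hb3] at this; exact this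
    have hv12 : v1 ≤ v2 := by simp at hpw3; omega
    have hwsnoc : pvW β lo (k + 1) = pvW β lo k ++ [β k] := pvW_snoc β lo k (by omega)
    have htopsnoc := pvTop3_snoc (pvW β lo k) (β k) h3 v0 v1 v2 u hdec
    rw [← hwsnoc] at htopsnoc
    have hrs : pvRS γ lo (k + 1) = pvRS γ lo k + γ k := pvRS_snoc γ lo k (by omega)
    show ((List.range' (k+1) n).foldl (pvBodyA β γ) (pvBodyA β γ (b, ms, _, M) k)).2.2.2 = _
    rw [pvBodyA]
    simp only [hmin]
    by_cases hlt : v0 < β k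
    · rw [if_pos hlt]
      have hv0b : v0 ∈ b := hbperm.mem_iff.mpr (by simp)
      have hrem : (PySem.List.remove? b v0).getD b = b.erase v0 := by
        rw [PySem.List.remove?_eq_some_erase b v0 hv0b]; rfl
      simp only [hrem]
      have heperm : (b.erase v0).Perm [v1, v2] := by
        have := List.Perm.erase v0 hbperm
        simpa using this
      have hb'perm : (b.erase v0 ++ [β k]).Perm (β k :: [v1, v2]) :=
        (List.perm_append_singleton _ _).trans (List.Perm.cons _ heperm)
      have hb'sorted : PySem.List.sorted (b.erase v0 ++ [β k]) (fun x => x)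
          = List.orderedInsert (· ≤ ·) (β k) [v1, v2] := by
        apply PySem.List.sorted_id_eq_of_perm_of_pairwise
        · exact (List.perm_orderedInsert _ (β k) [v1, v2]).trans hb'perm.symm
        · exact List.Pairwise.orderedInsert (β k) [v1, v2] (by simp [hv12])
      have hoisum : (List.orderedInsert (· ≤ ·) (β k) [v1, v2]).sum = β k + v1 + v2 := by
        rw [(List.perm_orderedInsert (· ≤ ·) (β k) [v1, v2]).sum_eq]; simp; ring
      have hesum : (b.erase v0).sum = v1 + v2 := by
        have := heperm.sum_eq; simp at this; omega
      have hms' : ms + γ k - v0 + β k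
          = pvRS γ lo (k + 1) + (b.erase v0 ++ [β k]).sum := by
        rw [hrs]; simp [List.sum_append, hesum]; omega
      have hF : pvF β γ lo (k + 1) = ms + γ k - v0 + β k := by
        rw [pvF, htopsnoc, if_pos hlt, hrs, hoisum, hms, hbsum]; ring
      rw [ih (k + 1) _ _ _ (by omega) (by rw [hb'sorted, htopsnoc, if_pos hlt]) hms']
      rw [hF]
    · rw [if_neg hlt]
      have hms' : ms + γ k = pvRS γ lo (k + 1) + b.sum := by rw [hrs, hms]; ring
      have hF : pvF β γ lo (k + 1) = ms + γ k := by
        rw [pvF, htopsnoc, if_neg hlt, hrs, hms, hbsum]; simp; ring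
      rw [← hmin, ih (k + 1) b _ _ (by omega) (by rw [hb3, htopsnoc, if_neg hlt]) hms']
      rw [hF]

lemma pvMGet_cast (m : List (List Int)) (i j : Nat) : pvMGet m i j = pvEnt m i j := by
  simp [pvMGet, pvEnt, PySem.List.pyGet?_natCast]

lemma pvMGet_tab (rN cN : Nat) (f : Nat → Nat → Int) (i j : Nat) (hi : i < rN) (hj : j < cN) :
    pvMGet (pvTab rN cN f) i j = f i j := by
  rw [pvMGet_cast]
  simp [pvEnt, pvTab, List.getElem?_map, List.getElem?_range hi, List.getElem?_range hj]

lemma pvSetMapRange {α : Type} (n : Nat) (f : Nat → α) (j : Nat) (v : α) (hj : j < n) :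
    ((List.range n).map f).set j v = (List.range n).map (fun t => if t = j then v else f t) := by
  apply List.ext_getElem
  · simp
  · intro idx h1 h2
    rw [List.getElem_set]
    simp only [List.getElem_map, List.getElem_range]
    by_cases h : idx = j
    · simp [h]
    · rw [if_neg (by omega), if_neg h]

lemma pvSet2_tab (rN cN : Nat) (f : Nat → Nat → Int) (i j : Nat) (v : Int)
    (hi : i < rN) (hj : j < cN) :
    pvSet2 (pvTab rN cN f) i j v
      = pvTab rN cN (fun i' j' => if i' = i ∧ j' = j then v else f i' j') := by
  rw [pvSet2]
  have hrow : ((pvTab rN cN f)[i]?).getD [] = (List.range cN).map (f i) := by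
    simp [pvTab, List.getElem?_map, List.getElem?_range hi]
  rw [hrow, pvSetMapRange cN (f i) j v hj, pvTab,
      pvSetMapRange rN (fun i => (List.range cN).map (f i)) i _ hi, pvTab]
  apply List.map_congr_left
  intro t _
  by_cases h : t = i
  · subst h
    rw [if_pos rfl]
    apply List.map_congr_left
    intro j' _
    by_cases hj' : j' = j <;> simp [hj']
  · rw [if_neg h]
    apply List.map_congr_left
    intro j' _
    simp [h]

lemma pvTab_congr (rN cN : Nat) (f g : Nat → Nat → Int)
    (h : ∀ i < rN, ∀ j < cN, f i j = g i j) : pvTab rN cN f = pvTab rN cN g := by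
  apply List.map_congr_left
  intro i hi
  apply List.map_congr_left
  intro j hj
  exact h i (List.mem_range.mp hi) j (List.mem_range.mp hj)

lemma pvIfBr (g p : Int) : (if g + p > g then g + p else g) = g + (if 0 < p then p else 0) := by
  split_ifs <;> omega

lemma pvColAux (matrix : List (List Int)) (rN cN n : Nat) (hn : n < cN) (k : Nat)
    (hk : k ≤ rN - 1) :
    (List.range k).foldl (fun br (i : Nat) =>
      let v : Int :=
        if (i : Int) = 0 then pvMGet matrix i n
        else if pvMGet matrix i n + pvMGet br ((i : Int) - 1) n > pvMGet matrix i n then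
          pvMGet matrix i n + pvMGet br ((i : Int) - 1) n
        else pvMGet matrix i n
      pvSet2 br (i : Int).toNat (n : Int).toNat v) (pvTab rN cN (pvEin matrix rN n 0))
    = pvTab rN cN (pvEin matrix rN n k) := by
  induction k with
  | zero => simp
  | succ k ih =>
    rw [List.range_succ, List.foldl_append, ih (by omega), List.foldl_cons, List.foldl_nil]
    have hkr : k < rN - 1 := by omega
    have htN : ((k : Int)).toNat = k := by omega
    have hnN : ((n : Int)).toNat = n := by omega
    have hv : (if ((k : Nat) : Int) = 0 then pvMGet matrix k n
        else if pvMGet matrix k n + pvMGet (pvTab rN cN (pvEin matrix rN n k)) ((k : Int) - 1) n > pvMGet matrix k n then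
          pvMGet matrix k n + pvMGet (pvTab rN cN (pvEin matrix rN n k)) ((k : Int) - 1) n
        else pvMGet matrix k n) = pvBr matrix k n := by
      rcases Nat.eq_zero_or_pos k with rfl | hk0
      · rw [if_pos (by simp), pvMGet_cast]; rfl
      · rw [if_neg (by omega)]
        have hc1 : ((k : Int) - 1) = ((k - 1 : Nat) : Int) := by omega
        rw [hc1, pvMGet_tab rN cN _ (k - 1) n (by omega) hn]
        have hcond : pvEin matrix rN n k (k - 1) n = pvBr matrix (k - 1) n := by
          rw [pvEin, if_pos (by omega)]
        rw [hcond, pvMGet_cast, pvIfBr]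
        have : k = (k - 1) + 1 := by omega
        rw [this, pvBr]
        simp
    simp only [hv, htN, hnN]
    rw [pvSet2_tab rN cN _ k n _ (by omega) hn]
    apply pvTab_congr
    intro i hi j hj
    by_cases hij : i = k ∧ j = n
    · obtain ⟨rfl, rfl⟩ := hij
      rw [if_pos ⟨rfl, rfl⟩, pvEin, if_pos (by omega)]
    · rw [if_neg hij, pvEin, pvEin]
      by_cases h1 : i < rN - 1 ∧ (j < n ∨ (j = n ∧ i < k))
      · rw [if_pos h1, if_pos (by omega)]
      · rw [if_neg h1, if_neg (by omega)]


lemma pvCol (matrix : List (List Int)) (c r : Int) (hr : 0 ≤ r) (n : Nat) (hn : n < c.toNat) :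
    (PySem.List.pyRange 0 (r - 1)).foldl (fun br (i : Int) =>
      let v : Int :=
        if i = 0 then pvMGet matrix i n
        else if pvMGet matrix i n + pvMGet br (i - 1) n > pvMGet matrix i n then
          pvMGet matrix i n + pvMGet br (i - 1) n
        else pvMGet matrix i n
      pvSet2 br i.toNat (n : Int).toNat v) (pvTab r.toNat c.toNat (pvEin matrix r.toNat n 0))
    = pvTab r.toNat c.toNat (pvEin matrix r.toNat n ((r - 1).toNat)) := by
  rw [pvPyRange_eq 0 (r - 1) le_rfl]
  simp only [Int.sub_zero, Int.toNat_zero, ← List.range_eq_range', List.foldl_map]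
  exact pvColAux matrix r.toNat c.toNat n hn ((r - 1).toNat) (by omega)

lemma pvColsAux (matrix : List (List Int)) (c r : Int) (hc : 0 ≤ c) (hr : 0 ≤ r) :
    ∀ (nn : Nat), nn ≤ c.toNat →
    (List.range nn).foldl (fun br (j : Nat) =>
      (PySem.List.pyRange 0 (r - 1)).foldl (fun br (i : Int) =>
        let v : Int :=
          if i = 0 then pvMGet matrix i j
          else if pvMGet matrix i j + pvMGet br (i - 1) j > pvMGet matrix i j then
            pvMGet matrix i j + pvMGet br (i - 1) j
          else pvMGet matrix i j
        pvSet2 br i.toNat (j : Int).toNat v) br)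
      (pvTab r.toNat c.toNat (fun _ _ => 0))
    = pvTab r.toNat c.toNat (pvEin matrix r.toNat nn 0) := by
  intro nn
  induction nn with
  | zero =>
    intro _
    simp only [List.range_zero, List.foldl_nil]
    apply pvTab_congr
    intro i hi j hj
    rw [pvEin, if_neg (by omega)]
  | succ nn ih =>
    intro hnn
    rw [List.range_succ, List.foldl_append, ih (by omega), List.foldl_cons, List.foldl_nil,
        pvCol matrix c r hr nn (by omega)]
    apply pvTab_congr
    intro i hi j hj
    have hr1 : (r - 1).toNat = r.toNat - 1 := by omega
    rw [pvEin, pvEin, hr1]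
    by_cases h1 : i < r.toNat - 1 ∧ (j < nn ∨ (j = nn ∧ i < r.toNat - 1))
    · rw [if_pos h1, if_pos (by omega)]
    · rw [if_neg h1, if_neg (by omega)]

lemma pvBranches_eq (matrix : List (List Int)) (c r : Int) (hc : 0 ≤ c) (hr : 0 ≤ r) :
    pvGetBranchesTop matrix c r = pvTab r.toNat c.toNat (pvEfin matrix r.toNat) := by
  rw [pvGetBranchesTop]
  have hinit : ((PySem.List.pyRange 0 r).map (fun _ => List.replicate c.toNat 0))
      = pvTab r.toNat c.toNat (fun _ _ => 0) := by
    rw [pvPyRange_eq 0 r le_rfl]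
    simp only [Int.sub_zero, Int.toNat_zero, ← List.range_eq_range', List.map_map, pvTab]
    apply List.map_congr_left
    intro i _
    simp [List.map_const', Function.comp]
  rw [hinit, pvPyRange_eq 0 c le_rfl]
  simp only [Int.sub_zero, Int.toNat_zero, ← List.range_eq_range', List.foldl_map]
  rw [pvColsAux matrix c r hc hr c.toNat le_rfl]
  apply pvTab_congr
  intro i hi j hj
  rw [pvEin, pvEfin]
  by_cases h1 : i < r.toNat - 1
  · rw [if_pos (by omega), if_pos h1]
  · rw [if_neg (by omega), if_neg h1]

lemma pvDropRange (n m : Nat) : (List.range n).drop m = List.range' m (n - m) := by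
  rw [List.range_eq_range', List.drop_range']
  congr 1
  omega

lemma pvTakeRange' (s n m : Nat) (h : m ≤ n) : (List.range' s n).take m = List.range' s m := by
  have hn : n = m + (n - m) := by omega
  rw [hn, ← List.range'_append (s := s) (m := m), List.take_left']
  exact List.length_range'

lemma pvRS_split (γ : Nat → Int) (lo e : Nat) (h : lo ≤ e) :
    pvRS γ 0 e - pvRS γ 0 lo = pvRS γ lo e := by
  have he : e - 0 = lo + (e - lo) := by omega
  rw [pvRS, he, ← List.range'_append (s := 0) (m := lo), List.map_append, List.sum_append]
  have h1 : (0 : Nat) + 1 * lo = lo := by omega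
  rw [h1]
  rw [pvRS, pvRS]
  simp

lemma pvP_eq (matrix : List (List Int)) (c : Int) (hc : 0 ≤ c) (j : Nat) :
    (PySem.List.pyRange 0 c).foldl
      (fun P jj => P ++ [(PySem.List.pyGet? P (-1)).getD 0 + pvMGet matrix j jj]) [(0 : Int)]
    = (List.range (c.toNat + 1)).map (pvRS (pvEnt matrix j) 0) := by
  rw [pvPyRange_eq 0 c le_rfl]
  simp only [Int.sub_zero, Int.toNat_zero, ← List.range_eq_range', List.foldl_map]
  induction c.toNat with
  | zero => simp [pvRS]
  | succ nn ih =>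
    rw [List.range_succ, List.foldl_append, ih, List.foldl_cons, List.foldl_nil]
    rw [PySem.List.pyGet?_neg_one, List.getLast?_map]
    have hlast : (List.range (nn + 1)).getLast? = some nn := by
      rw [List.range_succ, List.getLast?_concat]
    rw [hlast, pvMGet_cast]
    show (List.range (nn + 1)).map (pvRS (pvEnt matrix j) 0)
        ++ [pvRS (pvEnt matrix j) 0 nn + pvEnt matrix j nn] = _
    rw [show pvRS (pvEnt matrix j) 0 nn + pvEnt matrix j nn = pvRS (pvEnt matrix j) 0 (nn + 1) by
          rw [pvRS_snoc _ 0 nn (by omega)]]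
    rw [show List.range (nn + 1 + 1) = List.range (nn + 1) ++ [nn + 1] from List.range_succ,
        List.map_append]
    simp

lemma pvSlice_prev (β : Nat → Int) (cN lo hi : Nat) (hhi : hi + 1 ≤ cN) (hlo : lo ≤ hi + 1) :
    PySem.List.slice ((List.range cN).map β) (some (lo : Int)) (some ((hi + 1 : Nat) : Int))
      = pvW β lo (hi + 1) := by
  rw [PySem.List.slice_natCast, ← List.map_drop, pvDropRange, ← List.map_take,
      pvTakeRange' lo (cN - lo) (hi + 1 - lo) (by omega)]
  rfl

lemma pvSliceSorted (w : List Int) :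
    PySem.List.slice (PySem.List.sorted w (fun x => x)) (some (-3)) none = pvTop3 w := by
  rw [PySem.List.slice_from_neg_ofNat _ 3 (by norm_num), PySem.List.length_sorted]
  rfl


lemma pvWin3 (β : Nat → Int) (lo : Nat) : pvW β lo (lo + 3) = [β lo, β (lo + 1), β (lo + 2)] := by
  rw [pvW, show lo + 3 - lo = 3 by omega]
  rfl

lemma pvTop3_of_three (w : List Int) (h : w.length = 3) :
    pvTop3 w = PySem.List.sorted w (fun x => x) := by
  rw [pvTop3, h]
  simp

lemma pvSortedSum (w : List Int) : (PySem.List.sorted w (fun x => x)).sum = w.sum :=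
  (PySem.List.sorted_perm w (fun x => x) false).sum_eq

lemma pvRowA (matrix : List (List Int)) (c r : Int) (hc : 3 ≤ c) (hr : 2 ≤ r)
    (j : Nat) (h1 : 1 ≤ j) (hjr : j < r.toNat) (M : Int) :
    pvRowBodyA matrix (pvTab r.toNat c.toNat (pvEfin matrix r.toNat)) c (j : Int) M
      = pvStep (pvBr matrix (j - 1)) (pvEnt matrix j) c.toNat M := by
  have hj1 : ((j : Nat) : Int) - 1 = ((j - 1 : Nat) : Int) := by omega
  have hb : ∀ (t : Nat), t < c.toNat →
      pvMGet (pvTab r.toNat c.toNat (pvEfin matrix r.toNat)) (((j : Nat) : Int) - 1) (t : Int)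
        = pvBr matrix (j - 1) t := by
    intro t ht
    rw [hj1, pvMGet_tab r.toNat c.toNat _ _ _ (by omega) ht, pvEfin, if_pos (by omega)]
  rw [pvRowBodyA, pvPyRange_eq 0 (c - 2) le_rfl, pvStep]
  rw [show ((c - 2 : Int) - 0).toNat = c.toNat - 2 by omega]
  simp only [Int.toNat_zero, ← List.range_eq_range', List.foldl_map]
  apply PySem.List.foldl_congr_mem
  intro acc lo hlo
  have hloc : lo < c.toNat - 2 := by
    have := List.mem_range.mp hlo; omega
  have e1 : ((lo : Nat) : Int) + 1 = ((lo + 1 : Nat) : Int) := by omega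
  have e2 : ((lo : Nat) : Int) + 2 = ((lo + 2 : Nat) : Int) := by omega
  have e3 : ((lo : Nat) : Int) + 3 = ((lo + 3 : Nat) : Int) := by omega
  simp only [e1, e2, e3, hb lo (by omega), hb (lo + 1) (by omega), hb (lo + 2) (by omega),
    pvMGet_cast]
  -- inner fold: convert range and body
  rw [pvPyRange_eq ((lo + 3 : Nat) : Int) c (by omega),
      show (((lo + 3 : Nat) : Int)).toNat = lo + 3 by omega,
      show (c - ((lo + 3 : Nat) : Int)).toNat = c.toNat - (lo + 3) by omega,
      List.foldl_map]
  refine Eq.trans (congrArg (fun st : List Int × Int × Int × Int => st.2.2.2)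
      (PySem.List.foldl_congr_mem _ _ (pvBodyA (pvBr matrix (j - 1)) (pvEnt matrix j)) _ ?_)) ?_
  · intro st i hi
    have hic : i < c.toNat := by
      have := List.mem_range'_1.mp hi; omega
    simp only [pvBodyA, hb i hic, pvMGet_cast]
  have hw3 : pvW (pvBr matrix (j - 1)) lo (lo + 3)
      = [pvBr matrix (j - 1) lo, pvBr matrix (j - 1) (lo + 1), pvBr matrix (j - 1) (lo + 2)] :=
    pvWin3 _ lo
  have hsort : PySem.List.sorted
      [pvBr matrix (j - 1) lo, pvBr matrix (j - 1) (lo + 1), pvBr matrix (j - 1) (lo + 2)] (fun x => x)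
      = pvTop3 (pvW (pvBr matrix (j - 1)) lo (lo + 3)) := by
    rw [pvTop3_of_three _ (by rw [pvW_length]; omega), hw3]
  have hms : pvEnt matrix j lo + pvEnt matrix j (lo + 1) + pvEnt matrix j (lo + 2)
        + pvBr matrix (j - 1) lo + pvBr matrix (j - 1) (lo + 1) + pvBr matrix (j - 1) (lo + 2)
      = pvRS (pvEnt matrix j) lo (lo + 3)
        + ([pvBr matrix (j - 1) lo, pvBr matrix (j - 1) (lo + 1), pvBr matrix (j - 1) (lo + 2)]).sum := by
    rw [pvRS, show lo + 3 - lo = 3 by omega,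
        show List.range' lo 3 = [lo, lo + 1, lo + 2] from rfl]
    simp
    ring
  beta_reduce
  rw [pvInnerA (pvBr matrix (j - 1)) (pvEnt matrix j) lo (c.toNat - (lo + 3)) (lo + 3) _ _ _
        le_rfl hsort hms]
  have hF0 : pvF (pvBr matrix (j - 1)) (pvEnt matrix j) lo (lo + 2 + 1)
      = pvEnt matrix j lo + pvEnt matrix j (lo + 1) + pvEnt matrix j (lo + 2)
        + pvBr matrix (j - 1) lo + pvBr matrix (j - 1) (lo + 1) + pvBr matrix (j - 1) (lo + 2) := by
    rw [pvF, show lo + 2 + 1 = lo + 3 from rfl, pvTop3_of_three _ (by rw [pvW_length]; omega),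
        pvSortedSum, hw3, pvRS, show lo + 3 - lo = 3 by omega,
        show List.range' lo 3 = [lo, lo + 1, lo + 2] from rfl]
    simp
    ring
  rw [show c.toNat - (lo + 2) = (c.toNat - (lo + 3)) + 1 by omega, List.range'_succ,
      List.foldl_cons, hF0]

lemma pvRowB (matrix : List (List Int)) (c r : Int) (hc : 3 ≤ c) (hr : 2 ≤ r)
    (j : Nat) (h1 : 1 ≤ j) (hjr : j < r.toNat) (M : Int) :
    pvRowBodyB matrix c (j : Int) ((List.range c.toNat).map (pvBr matrix (j - 1)), M)
      = ((List.range c.toNat).map (pvBr matrix j),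
         pvStep (pvBr matrix (j - 1)) (pvEnt matrix j) c.toNat M) := by
  rw [pvRowBodyB]
  have hP : (PySem.List.pyRange 0 c).foldl
      (fun P jj => P ++ [(PySem.List.pyGet? P (-1)).getD 0 + pvMGet matrix (j : Int) jj]) [(0 : Int)]
      = (List.range (c.toNat + 1)).map (pvRS (pvEnt matrix j) 0) := pvP_eq matrix c (by omega) j
  refine Prod.ext ?_ ?_
  · -- the updated prev row
    show (PySem.List.pyRange 0 c).map _ = _
    rw [pvPyRange_eq 0 c le_rfl]
    simp only [Int.sub_zero, Int.toNat_zero, ← List.range_eq_range', List.map_map]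
    apply List.map_congr_left
    intro jj hjj
    have hjjc : jj < c.toNat := List.mem_range.mp hjj
    have hget : (PySem.List.pyGet? ((List.range c.toNat).map (pvBr matrix (j - 1))) (jj : Int)).getD 0
        = pvBr matrix (j - 1) jj := by
      rw [PySem.List.pyGet?_natCast]
      simp [List.getElem?_map, List.getElem?_range hjjc]
    simp only [Function.comp, hget, pvMGet_cast]
    rw [show j = (j - 1) + 1 by omega, pvBr]
    simp
  · -- the best accumulator
    show (PySem.List.pyRange 0 (c - 2)).foldl _ M = _
    simp only [hP]
    rw [pvPyRange_eq 0 (c - 2) le_rfl, pvStep,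
        show ((c - 2 : Int) - 0).toNat = c.toNat - 2 by omega]
    simp only [Int.toNat_zero, ← List.range_eq_range', List.foldl_map]
    apply PySem.List.foldl_congr_mem
    intro acc lo hlo
    have hloc : lo < c.toNat - 2 := List.mem_range.mp hlo
    rw [show ((lo : Nat) : Int) + 2 = ((lo + 2 : Nat) : Int) by omega,
        pvPyRange_eq ((lo + 2 : Nat) : Int) c (by omega),
        show (((lo + 2 : Nat) : Int)).toNat = lo + 2 by omega,
        show (c - ((lo + 2 : Nat) : Int)).toNat = c.toNat - (lo + 2) by omega,
        List.foldl_map]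
    apply PySem.List.foldl_congr_mem
    intro best hi hhi
    have hir : lo + 2 ≤ hi ∧ hi < c.toNat := by
      have := List.mem_range'_1.mp hhi; omega
    have eh : ((hi : Nat) : Int) + 1 = ((hi + 1 : Nat) : Int) := by omega
    have hPget : ∀ t : Nat, t ≤ c.toNat →
        (PySem.List.pyGet? ((List.range (c.toNat + 1)).map (pvRS (pvEnt matrix j) 0)) ((t : Nat) : Int)).getD 0
          = pvRS (pvEnt matrix j) 0 t := by
      intro t ht
      rw [PySem.List.pyGet?_natCast]
      simp [List.getElem?_map, List.getElem?_range (show t < c.toNat + 1 by omega)]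
    show (if _ > best then _ else best) = _
    rw [eh, hPget (hi + 1) (by omega), hPget lo (by omega),
        pvSlice_prev (pvBr matrix (j - 1)) c.toNat lo hi (by omega) (by omega),
        pvSliceSorted, pvRS_split (pvEnt matrix j) lo (hi + 1) (by omega), ← pvF]

lemma pvOuterLoop (matrix : List (List Int)) (c r : Int) (hc : 3 ≤ c) (hr : 2 ≤ r) :
    ∀ (n jv : Nat) (M : Int), 1 ≤ jv → jv + n = r.toNat →
    (List.range' jv n).foldl
        (fun M (j : Nat) =>
          pvRowBodyA matrix (pvTab r.toNat c.toNat (pvEfin matrix r.toNat)) c (j : Int) M) M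
      = ((List.range' jv n).foldl (fun st (j : Nat) => pvRowBodyB matrix c (j : Int) st)
          ((List.range c.toNat).map (pvBr matrix (jv - 1)), M)).2 := by
  intro n
  induction n with
  | zero => intro jv M _ _; simp
  | succ n ih =>
    intro jv M h1 hsum
    rw [List.range'_succ, List.foldl_cons, List.foldl_cons,
        pvRowA matrix c r hc hr jv h1 (by omega) M,
        pvRowB matrix c r hc hr jv h1 (by omega) M]
    have := ih (jv + 1) (pvStep (pvBr matrix (jv - 1)) (pvEnt matrix jv) c.toNat M)
      (by omega) (by omega)
    simpa using this

lemma pvEquiv : ∀ (matrix : List (List Int)) (c r maxSum : Int),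
    kadaneTop matrix c r maxSum = kadaneTop_alt matrix c r maxSum := by
  intro matrix c r maxSum
  by_cases hcr : c < 3 ∨ r < 2
  · have hB : kadaneTop_alt matrix c r maxSum = maxSum := by
      rw [kadaneTop_alt, if_pos hcr]
    rw [hB, kadaneTop]
    rcases hcr with hc | hr2
    · refine Eq.trans (PySem.List.foldl_congr_mem _ _ (fun acc _ => acc) _ ?_)
        (PySem.List.foldl_ignore _ _)
      intro acc x _
      rw [PySem.List.pyRange_one_eq_nil (show c - 2 ≤ 0 by omega), List.foldl_nil]
    · rw [PySem.List.pyRange_one_eq_nil (show r ≤ 1 by omega), List.foldl_nil]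
  · have hc : 3 ≤ c := by omega
    have hr : 2 ≤ r := by omega
    have hA : kadaneTop matrix c r maxSum = (PySem.List.pyRange 1 r).foldl
        (fun M j => pvRowBodyA matrix (pvGetBranchesTop matrix c r) c j M) maxSum := rfl
    have hB : kadaneTop_alt matrix c r maxSum
        = ((PySem.List.pyRange 1 r).foldl (fun st j => pvRowBodyB matrix c j st)
            ((PySem.List.pyRange 0 c).map (fun jj => pvMGet matrix 0 jj), maxSum)).2 := by
      rw [kadaneTop_alt, if_neg (by omega)]
      rfl
    have hprev0 : (PySem.List.pyRange 0 c).map (fun jj => pvMGet matrix 0 jj)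
        = (List.range c.toNat).map (pvBr matrix (1 - 1)) := by
      rw [pvPyRange_eq 0 c le_rfl]
      simp only [Int.sub_zero, Int.toNat_zero, ← List.range_eq_range', List.map_map]
      apply List.map_congr_left
      intro t _
      simp only [Function.comp]
      rw [show (1 - 1 : Nat) = 0 from rfl, pvBr, show (0 : Int) = ((0 : Nat) : Int) from rfl,
          pvMGet_cast]
    rw [hA, hB, pvBranches_eq matrix c r (by omega) (by omega), hprev0,
        pvPyRange_eq 1 r (by omega),
        show ((1 : Int)).toNat = 1 from rfl,
        show ((r : Int) - 1).toNat = r.toNat - 1 by omega]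
    simp only [List.foldl_map]
    exact pvOuterLoop matrix c r hc hr (r.toNat - 1) 1 maxSum le_rfl (by omega)

-- ===== VERDICT (by name: the statement is the Claim_ definition above) =====
theorem kadaneTop_spec : Claim_equal_kadaneTop := by
  intro matrix c r maxSum _ _
  show kadaneTop matrix c r maxSum = kadaneTop_alt matrix c r maxSum
  exact pvEquiv matrix c r maxSum
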